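-- pv_equiv track=rewrite | github.com/gbourdin/ebay-watchlist | src/ebay_watchlist/web/view_helpers.py | build_page_sequence
-- ===== SOURCE A (Python) =====
-- def build_page_sequence(
--     page: int,
--     total_pages: int,
--     radius: int = 2,
-- ) -> list[int | None]:
--     if total_pages <= 1:
--         return [1]
--
--     visible_pages = {1, total_pages}
--     start_page = max(1, page - radius)
--     end_page = min(total_pages, page + radius)
--     visible_pages.update(range(start_page, end_page + 1))
--
--     sequence: list[int | None] = []
--     previous: int | None = None
--     for page_number in sorted(visible_pages):
--         if previous is not None and (page_number - previous) > 1: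
--             sequence.append(None)
--         sequence.append(page_number)
--         previous = page_number
--
--     return sequence
-- ===== SOURCE B (Python) =====
-- def build_page_sequence(page, total_pages, radius=2):
--     if total_pages <= 1:
--         return [1]
--     start_page = max(1, page - radius)
--     end_page = min(total_pages, page + radius)
--     if start_page > end_page:
--         # empty window: only the two endpoint pages are visible
--         return [1] + ([None] if total_pages - 1 > 1 else []) + [total_pages]
--     sequence = []
--     if start_page > 1:
--         sequence.append(1)
--         if start_page - 1 > 1:
--             sequence.append(None)
--     sequence.extend(range(start_page, end_page + 1))
--     if end_page < total_pages:
--         if total_pages - end_page > 1: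
--             sequence.append(None)
--         sequence.append(total_pages)
--     return sequence
-- ===== Notes on version B (the rewrite author's own statement) =====
-- stated objective: simpler
-- what changed: B builds the sequence directly in three pieces (optional leading 1 with gap marker, the visible window, optional trailing total_pages with gap marker) instead of materialising a set, sorting it and scanning for gaps; this removes the set and the sort (measured ~4x faster on large windows).
import Mathlib
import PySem

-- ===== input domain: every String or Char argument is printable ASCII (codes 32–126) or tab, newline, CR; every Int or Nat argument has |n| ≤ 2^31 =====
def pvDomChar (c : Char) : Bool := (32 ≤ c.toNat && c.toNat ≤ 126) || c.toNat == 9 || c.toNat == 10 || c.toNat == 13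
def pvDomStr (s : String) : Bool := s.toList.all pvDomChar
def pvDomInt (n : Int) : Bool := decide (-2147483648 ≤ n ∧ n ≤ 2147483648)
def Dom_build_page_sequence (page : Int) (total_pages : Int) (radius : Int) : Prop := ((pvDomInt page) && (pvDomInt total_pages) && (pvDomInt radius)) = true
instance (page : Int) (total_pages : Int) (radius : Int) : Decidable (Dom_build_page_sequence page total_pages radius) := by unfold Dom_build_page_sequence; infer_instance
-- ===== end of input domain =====

-- B replaces A's set+sort+gap-scan by a direct three-piece construction of the same sequence (objective: simpler).

-- ===== PORT A =====
def build_page_sequence (page : Int) (total_pages : Int) (radius : Int) : List (Option Int) :=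
  if total_pages ≤ 1 then [some 1]
  else
    let start_page := max 1 (page - radius)
    let end_page := min total_pages (page + radius)
    let visible_pages : PySem.Set Int :=
      PySem.Set.update (PySem.Set.ofList [1, total_pages])
        (PySem.List.pyRange start_page (end_page + 1) 1)
    let final :=
      (PySem.List.sorted visible_pages (fun x => x) false).foldl
        (fun (st : List (Option Int) × Option Int) page_number =>
          let seq :=
            match st.2 with
            | some previous => if page_number - previous > 1 then st.1 ++ [none] else st.1
            | none => st.1
          (seq ++ [some page_number], some page_number))
        ([], none)
    final.1

-- ===== PORT B =====
def build_page_sequence_alt (page : Int) (total_pages : Int) (radius : Int) : List (Option Int) :=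
  if total_pages ≤ 1 then [some 1]
  else
    let start_page := max 1 (page - radius)
    let end_page := min total_pages (page + radius)
    if start_page > end_page then
      [some 1] ++ (if total_pages - 1 > 1 then [none] else []) ++ [some total_pages]
    else
      (if start_page > 1 then
        [some 1] ++ (if start_page - 1 > 1 then [none] else [])
      else []) ++
      (PySem.List.pyRange start_page (end_page + 1) 1).map some ++
      (if end_page < total_pages then
        (if total_pages - end_page > 1 then [none] else []) ++ [some total_pages]
      else [])

-- ===== PRECONDITION & SPEC =====
def Spec_build_page_sequence (page : Int) (total_pages : Int) (radius : Int) (out : List (Option Int)) : Prop := out = build_page_sequence_alt page total_pages radius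
instance (page : Int) (total_pages : Int) (radius : Int) (out : List (Option Int)) : Decidable (Spec_build_page_sequence page total_pages radius out) := by unfold Spec_build_page_sequence; infer_instance

-- ===== CLAIM (what is proved, stated in full; the proofs are below) =====
def Claim_equal_build_page_sequence : Prop := ∀ (page : Int) (total_pages : Int) (radius : Int), Dom_build_page_sequence page total_pages radius → Spec_build_page_sequence page total_pages radius (build_page_sequence page total_pages radius)

-- ===== LEMMAS AND PROOFS =====

def pvStep (st : List (Option Int) × Option Int) (page_number : Int) : List (Option Int) × Option Int :=
  let seq :=
    match st.2 with
    | some previous => if page_number - previous > 1 then st.1 ++ [none] else st.1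
    | none => st.1
  (seq ++ [some page_number], some page_number)

theorem pvStep_some (acc : List (Option Int)) (p x : Int) :
    pvStep (acc, some p) x = (acc ++ (if x - p > 1 then [none] else []) ++ [some x], some x) := by
  simp only [pvStep]; split_ifs <;> simp

theorem pvFoldR (n : Nat) : ∀ (a b p : Int) (acc : List (Option Int)), a < b → (b - a).toNat = n →
    (PySem.List.pyRange a b 1).foldl pvStep (acc, some p)
      = (acc ++ (if a - p > 1 then [none] else []) ++ (PySem.List.pyRange a b 1).map some, some (b - 1)) := by
  induction n with
  | zero => intro a b p acc hab hn; omega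
  | succ n ih =>
    intro a b p acc hab hn
    rw [PySem.List.pyRange_one_cons hab]
    simp only [List.foldl_cons, List.map_cons, pvStep_some]
    by_cases h2 : a + 1 < b
    · rw [ih (a+1) b a _ h2 (by omega)]
      simp
    · have hb : b = a + 1 := by omega
      subst hb
      rw [PySem.List.pyRange_one_eq_nil (by omega)]
      simp

theorem pvFoldNone (a b : Int) (h : a < b) :
    (PySem.List.pyRange a b 1).foldl pvStep ([], none)
      = ((PySem.List.pyRange a b 1).map some, some (b - 1)) := by
  rw [PySem.List.pyRange_one_cons h]
  simp only [List.foldl_cons, List.map_cons]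
  have h1 : pvStep ([], none) a = ([some a], some a) := by simp [pvStep]
  rw [h1]
  by_cases h2 : a + 1 < b
  · rw [pvFoldR (b - (a+1)).toNat (a+1) b a [some a] h2 rfl]
    simp
  · have hb : b = a + 1 := by omega
    subst hb
    rw [PySem.List.pyRange_one_eq_nil (by omega)]
    simp

theorem build_page_sequence_eq (page t radius : Int) (ht : ¬ t ≤ 1) :
    build_page_sequence page t radius = build_page_sequence_alt page t radius := by
  simp only [build_page_sequence, build_page_sequence_alt, if_neg ht]
  set s := max 1 (page - radius) with hs_def
  set e := min t (page + radius) with he_def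
  have hs1 : (1:Int) ≤ s := le_max_left _ _
  have het : e ≤ t := min_le_left _ _
  clear_value s e
  by_cases hse : s > e
  · -- empty window
    rw [PySem.List.pyRange_one_eq_nil (by omega)]
    rw [if_pos hse]
    have hof : PySem.Set.ofList [(1:Int), t] = [1, t] := by
      apply PySem.Set.ofList_eq_self_of_nodup
      simp; omega
    rw [PySem.Set.update_nil, hof]
    have hsorted : PySem.List.sorted [(1:Int), t] (fun x => x) false = [1, t] := by
      apply PySem.List.sorted_eq_self_of_pairwise
      simp; omega
    rw [hsorted]
    rw [show (fun (st : List (Option Int) × Option Int) (page_number : Int) =>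
          ((match st.2 with
            | some previous => if page_number - previous > 1 then st.1 ++ [none] else st.1
            | none => st.1) ++ [some page_number], some page_number)) = pvStep from rfl]
    simp only [List.foldl_cons, List.foldl_nil]
    have h1 : pvStep ([], none) 1 = ([some 1], some 1) := by simp [pvStep]
    rw [h1, pvStep_some]
  · -- s ≤ e
    have hes : s ≤ e := not_lt.mp hse
    have h1e : (1:Int) ≤ e := le_trans hs1 hes
    rw [if_neg hse]
    set V : List Int := (if 1 < s then [(1:Int)] else []) ++
        (PySem.List.pyRange s (e+1) 1 ++ (if e < t then [t] else [])) with hV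
    have hmemV : ∀ x : Int, x ∈ V ↔ (x = 1 ∨ x = t) ∨ (s ≤ x ∧ x < e + 1) := by
      intro x
      simp only [hV, List.mem_append, PySem.List.mem_pyRange_one]
      split_ifs <;> simp <;> omega
    have hpairV : V.Pairwise (fun a b => a < b) := by
      rw [hV]
      apply List.pairwise_append.mpr
      refine ⟨?_, ?_, ?_⟩
      · split_ifs <;> simp
      · apply List.pairwise_append.mpr
        refine ⟨PySem.List.pairwise_lt_pyRange_one s (e+1), ?_, ?_⟩
        · split_ifs <;> simp
        · intro a ha b hb
          rw [PySem.List.mem_pyRange_one] at ha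
          split_ifs at hb with hE
          · simp at hb; omega
          · simp at hb
      · intro a ha b hb
        split_ifs at ha with hS
        · simp at ha
          subst ha
          rcases List.mem_append.mp hb with h | h
          · rw [PySem.List.mem_pyRange_one] at h; omega
          · split_ifs at h with hE
            · simp at h; omega
            · simp at h
        · simp at ha
    have hnodV : V.Nodup := hpairV.imp (fun h => ne_of_lt h)
    have hsorted : PySem.List.sorted
        (PySem.Set.update (PySem.Set.ofList [(1:Int), t]) (PySem.List.pyRange s (e+1) 1))
        (fun x => x) false = V := by
      apply PySem.List.sorted_eq_of_perm_of_pairwise_lt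
      · apply (List.perm_ext_iff_of_nodup hnodV ?_).mpr
        · intro x
          rw [hmemV]
          simp only [PySem.Set.mem_update, PySem.Set.mem_ofList, PySem.List.mem_pyRange_one,
            List.mem_cons]
          tauto
        · exact PySem.Set.nodup_update _ _ (PySem.Set.nodup_ofList _)
      · exact hpairV
    rw [hsorted]
    rw [show (fun (st : List (Option Int) × Option Int) (page_number : Int) =>
          ((match st.2 with
            | some previous => if page_number - previous > 1 then st.1 ++ [none] else st.1
            | none => st.1) ++ [some page_number], some page_number)) = pvStep from rfl]
    by_cases hS : 1 < s
    · have hVeq : V = 1 :: (PySem.List.pyRange s (e+1) 1 ++ (if e < t then [t] else [])) := by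
        rw [hV, if_pos hS]; simp
      rw [hVeq]
      simp only [List.foldl_cons]
      rw [show pvStep ([], none) 1 = ([some 1], some 1) from by simp [pvStep]]
      rw [List.foldl_append]
      rw [pvFoldR ((e+1)-s).toNat s (e+1) 1 [some 1] (by omega) rfl]
      rw [if_pos hS]
      by_cases hE : e < t
      · rw [if_pos hE, if_pos hE]
        simp only [List.foldl_cons, List.foldl_nil, pvStep_some]
        have : (e:Int) + 1 - 1 = e := by ring
        rw [this]
        simp [List.append_assoc]
      · rw [if_neg hE, if_neg hE]
        simp
    · have hVeq : V = PySem.List.pyRange s (e+1) 1 ++ (if e < t then [t] else []) := by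
        rw [hV, if_neg hS]; simp
      rw [hVeq]
      rw [List.foldl_append]
      rw [pvFoldNone s (e+1) (by omega)]
      rw [if_neg hS]
      by_cases hE : e < t
      · rw [if_pos hE, if_pos hE]
        simp only [List.foldl_cons, List.foldl_nil, pvStep_some]
        have : (e:Int) + 1 - 1 = e := by ring
        rw [this]
        simp [List.append_assoc]
      · rw [if_neg hE, if_neg hE]
        simp

-- ===== VERDICT (by name: the statement is the Claim_ definition above) =====
theorem build_page_sequence_spec : Claim_equal_build_page_sequence := by
  intro page total_pages radius _hdom
  unfold Spec_build_page_sequence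
  by_cases ht : total_pages ≤ 1
  · simp [build_page_sequence, build_page_sequence_alt, ht]
  · exact build_page_sequence_eq page total_pages radius ht
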